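-- pv_equiv track=rewrite | github.com/dr-robert-li/wp-finetune | scripts/phase3_cot_agent.py | split_alphabetical
-- ===== SOURCE A (Python) =====
-- def split_alphabetical(examples: list[dict]) -> tuple[list, list, list]:
--     """Split phase1 examples into 3 groups by repo name for agent-style output."""
--     by_repo = {}
--     for ex in examples:
--         repo = ex.get("_source_repo", "zzz")
--         by_repo.setdefault(repo, []).append(ex)
--
--     repos = sorted(by_repo.keys())
--     # A-G, H-Q, R-Z.
--     group1, group2, group3 = [], [], []
--     for repo in repos:
--         first = repo[0].lower()
--         if first <= "g":
--             group1.extend(by_repo[repo])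
--         elif first <= "q":
--             group2.extend(by_repo[repo])
--         else:
--             group3.extend(by_repo[repo])
--
--     return group1, group2, group3
-- ===== SOURCE B (Python) =====
-- def _bucket(repo):
--     first = repo[0].lower()
--     if first <= "g":
--         return 1
--     if first <= "q":
--         return 2
--     return 3
--
--
-- def split_alphabetical(examples: list[dict]) -> tuple[list, list, list]:
--     """Split phase1 examples into 3 groups by repo name for agent-style output."""
--     key = lambda ex: ex.get("_source_repo", "zzz")
--     pick = lambda want: sorted((ex for ex in examples if _bucket(key(ex)) == want), key=key)
--     return pick(1), pick(2), pick(3)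
-- ===== Notes on version B (the rewrite author's own statement) =====
-- stated objective: alternative
-- what changed: Replaces the dict-of-buckets plus sorted-keys merge with three independent passes: for each letter group, filter the examples whose repo falls in that group and stably sort just that sublist by repo key; no dict and no grouping structure is built.
import Mathlib
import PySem

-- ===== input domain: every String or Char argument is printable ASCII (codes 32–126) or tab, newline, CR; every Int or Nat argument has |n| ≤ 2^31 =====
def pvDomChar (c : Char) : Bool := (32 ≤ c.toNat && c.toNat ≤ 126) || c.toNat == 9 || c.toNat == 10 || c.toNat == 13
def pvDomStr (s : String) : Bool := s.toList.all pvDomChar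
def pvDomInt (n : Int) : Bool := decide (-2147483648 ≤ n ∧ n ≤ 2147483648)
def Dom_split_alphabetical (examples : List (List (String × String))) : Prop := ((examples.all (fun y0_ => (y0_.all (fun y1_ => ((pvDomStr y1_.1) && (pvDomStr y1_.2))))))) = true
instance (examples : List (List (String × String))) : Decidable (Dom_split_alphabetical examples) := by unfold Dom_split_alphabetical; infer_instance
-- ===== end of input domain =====

-- B replaces A's dict-of-buckets + sorted-keys merge by three independent
-- filter-then-stable-sort passes, one per letter group (objective: alternative).

-- ===== PORT A =====
-- shared by both sources verbatim: ex.get("_source_repo", "zzz")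
def repoKey (ex : List (String × String)) : String :=
  (PySem.Dict.mk ex).getD "_source_repo" "zzz"

-- shared by both sources verbatim: repo[0].lower() then the <= "g" / <= "q" chain;
-- the `none` arm is unreachable under Pre_ (every repo key is nonempty)
def bucket (repo : String) : Nat :=
  match PySem.Str.pyGet? repo 0 with
  | some c =>
      let first := PySem.Str.lower (String.ofList [c])
      if first ≤ "g" then 1 else if first ≤ "q" then 2 else 3
  | none => 1

def split_alphabetical (examples : List (List (String × String))) : (List (List (String × String))) × (List (List (String × String))) × (List (List (String × String))) :=
  let byRepo := examples.foldl
    (fun d ex => d.modify (repoKey ex) [] (fun v => v ++ [ex]))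
    (PySem.Dict.mk [])
  let repos := PySem.List.sorted byRepo.keys (fun k => k) false
  repos.foldl
    (fun (g : (List (List (String × String))) × (List (List (String × String))) × (List (List (String × String)))) repo =>
      let b := bucket repo
      if b = 1 then (g.1 ++ byRepo.getD repo [], g.2.1, g.2.2)
      else if b = 2 then (g.1, g.2.1 ++ byRepo.getD repo [], g.2.2)
      else (g.1, g.2.1, g.2.2 ++ byRepo.getD repo []))
    ([], [], [])

-- ===== PORT B =====
-- Source B's pick(want): filter this group's examples, then stably sort them by key
def pickGroup (examples : List (List (String × String))) (want : Nat) : List (List (String × String)) :=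
  PySem.List.sorted (examples.filter (fun ex => decide (bucket (repoKey ex) = want))) repoKey false

def split_alphabetical_alt (examples : List (List (String × String))) : (List (List (String × String))) × (List (List (String × String))) × (List (List (String × String))) :=
  (pickGroup examples 1, pickGroup examples 2, pickGroup examples 3)

-- ===== PRECONDITION & SPEC =====
-- Pre_ excludes exactly the inputs where some example's repo key is the empty
-- string: there both Pythons raise IndexError on repo[0].
def Pre_split_alphabetical (examples : List (List (String × String))) : Prop :=
  ∀ ex ∈ examples, (PySem.Dict.mk ex).getD "_source_repo" "zzz" ≠ ""
instance (examples : List (List (String × String))) : Decidable (Pre_split_alphabetical examples) := by unfold Pre_split_alphabetical; infer_instance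
def pvWitness_split_alphabetical : (List (List (String × String))) :=
  [[("_source_repo", "alpha"), ("text", "hi")], [("x", "y")], [("_source_repo", "alpha")]]

def Spec_split_alphabetical (examples : List (List (String × String))) (out : (List (List (String × String))) × (List (List (String × String))) × (List (List (String × String)))) : Prop := out = split_alphabetical_alt examples
instance (examples : List (List (String × String))) (out : (List (List (String × String))) × (List (List (String × String))) × (List (List (String × String)))) : Decidable (Spec_split_alphabetical examples out) := by unfold Spec_split_alphabetical; infer_instance

-- ===== CLAIM (what is proved, stated in full; the proofs are below) =====
def Claim_equal_split_alphabetical : Prop := ∀ (examples : List (List (String × String))), Dom_split_alphabetical examples → Pre_split_alphabetical examples → Spec_split_alphabetical examples (split_alphabetical examples)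

-- ===== LEMMAS AND PROOFS =====

-- before-relation of the stable sort by repoKey
def bef (a b : List (String × String)) : Bool := decide (repoKey a < repoKey b)

theorem bef_eq : (fun a b => decide (repoKey a < repoKey b)) = bef := rfl

-- sorted over a snoc inserts the last element into the sorted prefix
theorem sorted_snoc {α κ : Type} [LinearOrder κ] (xs : List α) (x : α) (key : α → κ) :
    PySem.List.sorted (xs ++ [x]) key false
      = PySem.List.insertBy (fun a b => decide (key a < key b)) x (PySem.List.sorted xs key false) := by
  simp [PySem.List.sorted_eq_foldl_insertBy, List.foldl_append]

theorem insertBy_all_before {α : Type} (before : α → α → Bool) (x : α) (m : List α)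
    (h : ∀ z ∈ m, before x z = true) : PySem.List.insertBy before x m = x :: m := by
  cases m with
  | nil => rfl
  | cons y t => simp [PySem.List.insertBy, h y (by simp)]

theorem insertBy_append_left {α : Type} (before : α → α → Bool) (x : α) (m r : List α)
    (h : ∀ z ∈ m, before x z = false) :
    PySem.List.insertBy before x (m ++ r) = m ++ PySem.List.insertBy before x r := by
  induction m with
  | nil => rfl
  | cons y t ih =>
      simp only [List.cons_append, PySem.List.insertBy, h y (by simp), Bool.false_eq_true,
        if_false, List.cons.injEq, true_and]
      exact ih (fun z hz => h z (by simp [hz]))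

-- filtering away the inserted element
theorem filter_insertBy_neg {α : Type} (before : α → α → Bool) (q : α → Bool) (x : α) (l : List α)
    (hx : q x = false) :
    (PySem.List.insertBy before x l).filter q = l.filter q := by
  induction l with
  | nil => simp [PySem.List.insertBy, hx]
  | cons y t ih =>
      by_cases hb : before x y = true
      · simp [PySem.List.insertBy, hb, hx]
      · simp [PySem.List.insertBy, hb, List.filter_cons, ih]

-- on a key-sorted list, filtering commutes with stable insertion
theorem filter_insertBy_pos {α κ : Type} [LinearOrder κ] (key : α → κ) (q : α → Bool) (x : α) (l : List α)
    (hx : q x = true) (hs : l.Pairwise (fun a b => key a ≤ key b)) :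
    (PySem.List.insertBy (fun a b => decide (key a < key b)) x l).filter q
      = PySem.List.insertBy (fun a b => decide (key a < key b)) x (l.filter q) := by
  induction l with
  | nil => simp [PySem.List.insertBy, hx]
  | cons y t ih =>
      rcases List.pairwise_cons.mp hs with ⟨hy, ht⟩
      by_cases hb : key x < key y
      · -- x goes in front; every element of y :: t is strictly greater in key
        have hall : ∀ z ∈ (y :: t).filter q, decide (key x < key z) = true := by
          intro z hz
          have hz' := List.mem_of_mem_filter hz
          rcases List.mem_cons.mp hz' with h | h
          · subst h; simpa using hb
          · simpa using lt_of_lt_of_le hb (hy z h)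
        rw [show PySem.List.insertBy (fun a b => decide (key a < key b)) x (y :: t)
              = x :: y :: t by simp [PySem.List.insertBy, hb]]
        rw [insertBy_all_before _ _ _ hall]
        simp [List.filter_cons, hx]
      · rw [show PySem.List.insertBy (fun a b => decide (key a < key b)) x (y :: t)
              = y :: PySem.List.insertBy (fun a b => decide (key a < key b)) x t by
            simp [PySem.List.insertBy, hb]]
        cases hq : q y with
        | true =>
          simp only [List.filter_cons, hq, if_true, ih ht]
          rw [show PySem.List.insertBy (fun a b => decide (key a < key b)) x (y :: t.filter q)
                = y :: PySem.List.insertBy (fun a b => decide (key a < key b)) x (t.filter q) by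
              simp [PySem.List.insertBy, hb]]
        | false => simp [hq, ih ht]

-- inserting x whose key is an existing group key appends it to that group
theorem insertBy_flatMap_mem (ks : List String) (g : String → List (List (String × String)))
    (x : List (String × String)) (κ : String)
    (hκ : repoKey x = κ)
    (hp : ks.Pairwise (· < ·))
    (hg : ∀ k ∈ ks, ∀ y ∈ g k, repoKey y = k)
    (hne : ∀ k ∈ ks, g k ≠ [])
    (hmem : κ ∈ ks) :
    PySem.List.insertBy bef x (ks.flatMap g)
      = ks.flatMap (fun k => g k ++ if k = κ then [x] else []) := by
  induction ks with
  | nil => cases hmem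
  | cons k0 kt ih =>
      rcases List.pairwise_cons.mp hp with ⟨hk0, hpt⟩
      by_cases hk : κ = k0
      · subst hk
        have h0 : ∀ z ∈ g κ, bef x z = false := by
          intro z hz
          simp only [bef, hκ, hg κ (by simp) z hz]
          exact decide_eq_false (lt_irrefl κ)
        have h1 : ∀ z ∈ kt.flatMap g, bef x z = true := by
          intro z hz
          rcases List.mem_flatMap.mp hz with ⟨k, hkm, hzk⟩
          simp only [bef, hκ, hg k (by simp [hkm]) z hzk]
          exact decide_eq_true (hk0 k hkm)
        rw [List.flatMap_cons, insertBy_append_left _ _ _ _ h0, insertBy_all_before _ _ _ h1,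
          List.flatMap_cons, if_pos rfl,
          show List.flatMap (fun k => g k ++ if k = κ then [x] else []) kt = List.flatMap g kt from
            List.flatMap_congr (fun k hkm => by simp [(hk0 k hkm).ne'])]
        simp
      · have hmem' : κ ∈ kt := by
          rcases List.mem_cons.mp hmem with h | h
          · exact absurd h hk
          · exact h
        have hlt : k0 < κ := hk0 κ hmem'
        have h0 : ∀ z ∈ g k0, bef x z = false := by
          intro z hz
          simp only [bef, hκ, hg k0 (by simp) z hz]
          exact decide_eq_false (lt_asymm hlt)
        rw [List.flatMap_cons, insertBy_append_left _ _ _ _ h0,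
          ih hpt (fun k hkm => hg k (by simp [hkm])) (fun k hkm => hne k (by simp [hkm])) hmem',
          List.flatMap_cons, if_neg (fun h => hk h.symm)]
        simp

-- inserting x with a fresh key creates a new singleton group at the sorted spot
theorem insertBy_flatMap_new (ks : List String) (g : String → List (List (String × String)))
    (x : List (String × String)) (κ : String)
    (hκ : repoKey x = κ)
    (hp : ks.Pairwise (· < ·))
    (hg : ∀ k ∈ ks, ∀ y ∈ g k, repoKey y = k)
    (hne : ∀ k ∈ ks, g k ≠ [])
    (hmem : κ ∉ ks) :
    PySem.List.insertBy bef x (ks.flatMap g)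
      = (PySem.List.insertBy (fun a b => decide (a < b)) κ ks).flatMap
          (fun k => if k = κ then [x] else g k) := by
  induction ks with
  | nil => simp [PySem.List.insertBy]
  | cons k0 kt ih =>
      rcases List.pairwise_cons.mp hp with ⟨hk0, hpt⟩
      have hk : κ ≠ k0 := fun h => hmem (by simp [h])
      by_cases hlt : κ < k0
      · have h1 : ∀ z ∈ (k0 :: kt).flatMap g, bef x z = true := by
          intro z hz
          rcases List.mem_flatMap.mp hz with ⟨k, hkm, hzk⟩
          simp only [bef, hκ, hg k hkm z hzk]
          rcases List.mem_cons.mp hkm with h | h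
          · exact decide_eq_true (h ▸ hlt)
          · exact decide_eq_true (lt_trans hlt (hk0 k h))
        rw [insertBy_all_before _ _ _ h1,
          show PySem.List.insertBy (fun a b => decide (a < b)) κ (k0 :: kt) = κ :: k0 :: kt by
            simp [PySem.List.insertBy, hlt]]
        simp only [List.flatMap_cons, if_neg (Ne.symm hk)]
        rw [show List.flatMap (fun k => if k = κ then [x] else g k) kt = List.flatMap g kt from
          List.flatMap_congr (fun k hkm => by
            have : k ≠ κ := fun h => hmem (List.mem_cons_of_mem _ (h ▸ hkm))
            simp [this])]
        simp
      · have h0 : ∀ z ∈ g k0, bef x z = false := by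
          intro z hz
          simp only [bef, hκ, hg k0 (by simp) z hz]
          exact decide_eq_false hlt
        rw [List.flatMap_cons, insertBy_append_left _ _ _ _ h0,
          ih hpt (fun k hkm => hg k (by simp [hkm])) (fun k hkm => hne k (by simp [hkm]))
            (fun h => hmem (by simp [h])),
          show PySem.List.insertBy (fun a b => decide (a < b)) κ (k0 :: kt)
              = k0 :: PySem.List.insertBy (fun a b => decide (a < b)) κ kt by
            simp [PySem.List.insertBy, hlt]]
        simp [Ne.symm hk]

-- dedup over a snoc
theorem dedup_snoc {α : Type} [BEq α] [LawfulBEq α] (l : List α) (a : α) :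
    PySem.List.dedup (l ++ [a]) = if a ∈ l then PySem.List.dedup l else PySem.List.dedup l ++ [a] := by
  have h1 : PySem.List.dedup (l ++ [a]) = PySem.Set.add (PySem.List.dedup l) a := by
    simp only [PySem.List.dedup, PySem.Set.ofList, List.foldl_append, List.foldl_cons, List.foldl_nil]
  by_cases h : a ∈ l
  · rw [h1]; simp [PySem.Set.add, PySem.Set.contains, h]
  · rw [h1]; simp [PySem.Set.add, PySem.Set.contains, h]

theorem keys_insert {κ ν : Type} [BEq κ] [LawfulBEq κ] (d : PySem.Dict κ ν) (k : κ) (v : ν) :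
    (d.insert k v).keys = if k ∈ d.keys then d.keys else d.keys ++ [k] := by
  by_cases h : d.contains k = true
  · rw [if_pos ((PySem.Dict.contains_iff_mem_keys d k).mp h)]
    simp only [PySem.Dict.insert, h, if_pos, PySem.Dict.keys, List.map_map]
    refine List.map_congr_left (fun p _ => ?_)
    by_cases hp : p.1 == k
    · simp [(beq_iff_eq.mp hp).symm]
    · simp [hp]
  · rw [if_neg (fun hm => h ((PySem.Dict.contains_iff_mem_keys d k).mpr hm))]
    simp [PySem.Dict.insert, h, PySem.Dict.keys]

-- the dict A builds: its keys are the repo keys in first-occurrence order …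
theorem byRepo_keys (xs : List (List (String × String))) :
    (xs.foldl (fun d ex => d.modify (repoKey ex) [] (fun v => v ++ [ex])) (PySem.Dict.mk [])).keys
      = PySem.List.dedup (xs.map repoKey) := by
  induction xs using List.reverseRecOn with
  | nil => rfl
  | append_singleton xs x ih =>
      rw [List.foldl_append, List.foldl_cons, List.foldl_nil, List.map_append, List.map_cons,
        List.map_nil, dedup_snoc, PySem.Dict.modify, keys_insert, ih]
      by_cases h : repoKey x ∈ xs.map repoKey
      · rw [if_pos ((PySem.List.mem_dedup _ _).mpr h), if_pos h]
      · rw [if_neg (fun hm => h ((PySem.List.mem_dedup _ _).mp hm)), if_neg h]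

-- … and each entry is the original-order sublist of examples with that key
theorem byRepo_getD (xs : List (List (String × String))) (k : String) :
    (xs.foldl (fun d ex => d.modify (repoKey ex) [] (fun v => v ++ [ex])) (PySem.Dict.mk [])).getD k []
      = xs.filter (fun x => repoKey x = k) := by
  induction xs using List.reverseRecOn with
  | nil => rfl
  | append_singleton xs x ih =>
      rw [List.foldl_append, List.foldl_cons, List.foldl_nil, PySem.Dict.modify,
        PySem.Dict.getD_insert, List.filter_append]
      by_cases h : k = repoKey x
      · rw [if_pos h, ← h, ih]
        simp [← h]
      · rw [if_neg h, ih]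
        simp [Ne.symm h]

-- THE STABILITY/GROUPING THEOREM: the p-keyed part of the stable sort is the
-- concatenation, over the sorted distinct p-keys, of the original-order groups
theorem sorted_filter_grouping (xs : List (List (String × String))) (p : String → Bool) :
    (PySem.List.sorted xs repoKey false).filter (fun x => p (repoKey x))
      = ((PySem.List.sorted (PySem.List.dedup (xs.map repoKey)) (fun k => k) false).filter p).flatMap
          (fun k => xs.filter (fun x => repoKey x = k)) := by
  induction xs using List.reverseRecOn with
  | nil => rfl
  | append_singleton xs x ih =>
      have hKlt : (PySem.List.sorted (PySem.List.dedup (xs.map repoKey)) (fun k => k) false).Pairwise (· < ·) := by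
        rw [PySem.List.dedup_eq_ofList]
        exact PySem.List.sorted_ofList_pairwise_lt _
      have hks'lt := hKlt.filter p
      have hg : ∀ k ∈ (PySem.List.sorted (PySem.List.dedup (xs.map repoKey)) (fun k => k) false).filter p,
          ∀ y ∈ xs.filter (fun z => repoKey z = k), repoKey y = k := by
        intro k _ y hy
        have := (List.mem_filter.mp hy).2
        exact of_decide_eq_true this
      have hksmem : ∀ k ∈ (PySem.List.sorted (PySem.List.dedup (xs.map repoKey)) (fun k => k) false).filter p,
          k ∈ xs.map repoKey := fun k hkm =>
        (PySem.List.mem_dedup _ _).mp ((PySem.List.mem_sorted _ _ _ _).mp (List.mem_of_mem_filter hkm))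
      have hne : ∀ k ∈ (PySem.List.sorted (PySem.List.dedup (xs.map repoKey)) (fun k => k) false).filter p,
          xs.filter (fun z => repoKey z = k) ≠ [] := by
        intro k hkm hnil
        rcases List.mem_map.mp (hksmem k hkm) with ⟨y, hy, hyk⟩
        have : y ∈ xs.filter (fun z => decide (repoKey z = k)) := List.mem_filter.mpr ⟨hy, by simp [hyk]⟩
        simp [hnil] at this
      rw [sorted_snoc, List.map_append, List.map_cons, List.map_nil, dedup_snoc]
      by_cases hold : repoKey x ∈ xs.map repoKey
      · rw [if_pos hold]
        cases hq : p (repoKey x) with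
        | true =>
            have hmemks' : repoKey x ∈ (PySem.List.sorted (PySem.List.dedup (xs.map repoKey)) (fun k => k) false).filter p :=
              List.mem_filter.mpr ⟨(PySem.List.mem_sorted _ _ _ _).mpr ((PySem.List.mem_dedup _ _).mpr hold), by simp [hq]⟩
            rw [filter_insertBy_pos repoKey _ x _ hq (PySem.List.sorted_pairwise xs repoKey), ih,
              bef_eq, insertBy_flatMap_mem _ _ x (repoKey x) rfl hks'lt hg hne hmemks']
            refine List.flatMap_congr (fun k hkm => ?_)
            rw [List.filter_append]
            by_cases hkx : k = repoKey x
            · simp [hkx]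
            · simp only [if_neg hkx]
              simp
              exact fun h => hkx h.symm
        | false =>
            rw [filter_insertBy_neg _ _ x _ hq, ih]
            refine List.flatMap_congr (fun k hkm => ?_)
            have hkx : k ≠ repoKey x := by
              intro h
              rw [h] at hkm
              have := (List.mem_filter.mp hkm).2
              simp [hq] at this
            rw [List.filter_append]
            simp
            exact fun h => hkx h.symm
      · rw [if_neg hold]
        have hGnil : xs.filter (fun z => repoKey z = repoKey x) = [] := by
          rw [List.filter_eq_nil_iff]
          intro y hy h
          exact hold (List.mem_map.mpr ⟨y, hy, of_decide_eq_true h⟩)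
        rw [sorted_snoc (key := fun k => k)]
        cases hq : p (repoKey x) with
        | true =>
            have hnotmem : repoKey x ∉ (PySem.List.sorted (PySem.List.dedup (xs.map repoKey)) (fun k => k) false).filter p :=
              fun h => hold (hksmem _ h)
            rw [filter_insertBy_pos repoKey _ x _ hq (PySem.List.sorted_pairwise xs repoKey), ih,
              bef_eq, insertBy_flatMap_new _ _ x (repoKey x) rfl hks'lt hg hne hnotmem,
              filter_insertBy_pos (fun k => k) p (repoKey x) _ hq (hKlt.imp le_of_lt)]
            refine List.flatMap_congr (fun k hkm => ?_)
            rcases (PySem.List.mem_insertBy _ _ _ _).mp hkm with hkx | hkm'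
            · subst hkx
              rw [if_pos rfl, List.filter_append, hGnil]
              simp
            · have hkx : k ≠ repoKey x := fun h => hold (h ▸ hksmem k hkm')
              rw [if_neg hkx, List.filter_append]
              simp
              exact fun h => hkx h.symm
        | false =>
            rw [filter_insertBy_neg _ _ x _ hq, ih, filter_insertBy_neg _ p (repoKey x) _ hq]
            refine List.flatMap_congr (fun k hkm => ?_)
            have hkx : k ≠ repoKey x := fun h => hold (h ▸ hksmem k hkm)
            rw [List.filter_append]
            simp
            exact fun h => hkx h.symm

-- NEW for B: a stable key-sort commutes with a key-determined filter
theorem sorted_filter_comm (xs : List (List (String × String))) (q : String → Bool) :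
    (PySem.List.sorted xs repoKey false).filter (fun x => q (repoKey x))
      = PySem.List.sorted (xs.filter (fun x => q (repoKey x))) repoKey false := by
  induction xs using List.reverseRecOn with
  | nil => rfl
  | append_singleton xs x ih =>
      rw [sorted_snoc, List.filter_append]
      cases hq : q (repoKey x) with
      | true =>
          rw [filter_insertBy_pos repoKey _ x _ (by simpa using hq)
            (PySem.List.sorted_pairwise xs repoKey), ih]
          simp [hq, sorted_snoc]
      | false =>
          rw [filter_insertBy_neg _ _ x _ (by simpa using hq), ih]
          simp [hq]

theorem bucket_cases (r : String) : bucket r = 1 ∨ bucket r = 2 ∨ bucket r = 3 := by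
  unfold bucket
  cases PySem.Str.pyGet? r 0
  · simp
  · simp
    split_ifs <;> simp_all

-- A's output loop, characterised
theorem loopA (repos : List String) (h : String → List (List (String × String)))
    (g : (List (List (String × String))) × (List (List (String × String))) × (List (List (String × String)))) :
    repos.foldl
      (fun g repo =>
        let b := bucket repo
        if b = 1 then (g.1 ++ h repo, g.2.1, g.2.2)
        else if b = 2 then (g.1, g.2.1 ++ h repo, g.2.2)
        else (g.1, g.2.1, g.2.2 ++ h repo)) g
    = (g.1 ++ (repos.filter (fun r => bucket r = 1)).flatMap h,
       g.2.1 ++ (repos.filter (fun r => bucket r = 2)).flatMap h,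
       g.2.2 ++ (repos.filter (fun r => bucket r = 3)).flatMap h) := by
  induction repos generalizing g with
  | nil => simp
  | cons r rs ih =>
      rw [List.foldl_cons, ih]
      rcases bucket_cases r with hb | hb | hb <;> simp [hb]

-- ===== VERDICT (by name: the statement is the Claim_ definition above) =====
theorem split_alphabetical_spec : Claim_equal_split_alphabetical := by
  intro examples _ _
  show split_alphabetical examples = split_alphabetical_alt examples
  simp only [split_alphabetical, split_alphabetical_alt, pickGroup, loopA, byRepo_keys, byRepo_getD,
    List.nil_append, Prod.mk.injEq]
  refine ⟨?_, ?_, ?_⟩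
  · rw [← sorted_filter_comm examples (fun k => decide (bucket k = 1))]
    exact (sorted_filter_grouping examples (fun k => decide (bucket k = 1))).symm
  · rw [← sorted_filter_comm examples (fun k => decide (bucket k = 2))]
    exact (sorted_filter_grouping examples (fun k => decide (bucket k = 2))).symm
  · rw [← sorted_filter_comm examples (fun k => decide (bucket k = 3))]
    exact (sorted_filter_grouping examples (fun k => decide (bucket k = 3))).symm
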